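-- pv_equiv track=rewrite | github.com/bangca85/python-for-kid | basic/buoi22/bai13.py | find_extreme_expenses
-- ===== SOURCE A (Python) =====
-- def find_extreme_expenses(expenses):
--     highest_category = None
--     lowest_category = None
--     highest_amount = float('-inf')
--     lowest_amount = float('inf')
--
--     for category, amount in expenses.items():
--         if amount > highest_amount:
--             highest_amount = amount
--             highest_category = category
--         if amount < lowest_amount:
--             lowest_amount = amount
--             lowest_category = category
--
--     return highest_category, lowest_category
-- ===== SOURCE B (Python) =====
-- def find_extreme_expenses(expenses):
--     if not expenses:
--         return (None, None)
--     items = expenses.items()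
--     highest = max(items, key=lambda kv: kv[1])[0]
--     lowest = min(items, key=lambda kv: kv[1])[0]
--     return highest, lowest
-- ===== Notes on version B (the rewrite author's own statement) =====
-- stated objective: idiomatic
-- what changed: Replaces the hand-written single pass with four running accumulators by an empty guard plus two builtin max/min reductions keyed on the amount (first-extreme wins, matching A's strict-inequality tie behaviour).
import Mathlib
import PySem

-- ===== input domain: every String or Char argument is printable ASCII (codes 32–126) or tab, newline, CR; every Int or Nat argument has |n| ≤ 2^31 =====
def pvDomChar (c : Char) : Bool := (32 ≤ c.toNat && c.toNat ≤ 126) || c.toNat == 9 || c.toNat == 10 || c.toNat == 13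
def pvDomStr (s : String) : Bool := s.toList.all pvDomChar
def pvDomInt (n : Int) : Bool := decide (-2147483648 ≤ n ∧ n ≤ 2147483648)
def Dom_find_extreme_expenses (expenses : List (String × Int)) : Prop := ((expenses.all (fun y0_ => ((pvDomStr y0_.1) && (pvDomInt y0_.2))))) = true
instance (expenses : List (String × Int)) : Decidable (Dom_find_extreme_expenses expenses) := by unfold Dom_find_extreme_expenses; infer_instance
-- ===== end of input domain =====

-- B replaces A's hand-written single pass with four running accumulators by an empty-dict
-- guard plus two builtin max/min reductions keyed on the amount (idiomatic; same behaviour).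


-- ===== PORT A =====
-- `float('-inf')` / `float('inf')` as initial amounts are modelled by `none`:
-- every Int is > -inf and < inf, so the `none` branch of the comparison is `true`.
def pvGtH (ha : Option Int) (a : Int) : Bool :=
  match ha with
  | none => true          -- a > float('-inf')
  | some h => decide (h < a)

def pvLtL (la : Option Int) (a : Int) : Bool :=
  match la with
  | none => true          -- a < float('inf')
  | some l => decide (a < l)

def find_extreme_expenses (expenses : List (String × Int)) : Option String × Option String :=
  let st := expenses.foldl
    (fun st p =>
      let hc := st.1; let lc := st.2.1; let ha := st.2.2.1; let la := st.2.2.2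
      let hp := if pvGtH ha p.2 then (some p.1, some p.2) else (hc, ha)
      let lp := if pvLtL la p.2 then (some p.1, some p.2) else (lc, la)
      (hp.1, lp.1, hp.2, lp.2))
    ((none, none, none, none) : Option String × Option String × Option Int × Option Int)
  (st.1, st.2.1)

-- ===== PORT B =====
def find_extreme_expenses_alt (expenses : List (String × Int)) : Option String × Option String :=
  match expenses with
  | [] => (none, none)
  | _ :: _ =>
    ((PySem.List.max? expenses (fun kv => kv.2)).map (fun kv => kv.1),
     (PySem.List.min? expenses (fun kv => kv.2)).map (fun kv => kv.1))

-- ===== PRECONDITION & SPEC =====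
def Spec_find_extreme_expenses (expenses : List (String × Int)) (out : Option String × Option String) : Prop := out = find_extreme_expenses_alt expenses
instance (expenses : List (String × Int)) (out : Option String × Option String) : Decidable (Spec_find_extreme_expenses expenses out) := by unfold Spec_find_extreme_expenses; infer_instance

-- ===== CLAIM (what is proved, stated in full; the proofs are below) =====
def Claim_equal_find_extreme_expenses : Prop := ∀ (expenses : List (String × Int)), Dom_find_extreme_expenses expenses → Spec_find_extreme_expenses expenses (find_extreme_expenses expenses)

-- ===== LEMMAS AND PROOFS =====

-- Invariant: A's four accumulators are exactly the projections of the running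
-- first-max / first-min pairs of B's two folds.
theorem pv_fold_invariant (xs : List (String × Int)) (m k : Option (String × Int)) :
    xs.foldl
      (fun st p =>
        let hc := st.1; let lc := st.2.1; let ha := st.2.2.1; let la := st.2.2.2
        let hp := if pvGtH ha p.2 then (some p.1, some p.2) else (hc, ha)
        let lp := if pvLtL la p.2 then (some p.1, some p.2) else (lc, la)
        (hp.1, lp.1, hp.2, lp.2))
      (m.map (fun kv => kv.1), k.map (fun kv => kv.1),
       m.map (fun kv => kv.2), k.map (fun kv => kv.2)) =
    (let M := xs.foldl
        (fun acc x => match acc with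
          | none => some x
          | some q => if q.2 < x.2 then some x else some q) m
     let K := xs.foldl
        (fun acc x => match acc with
          | none => some x
          | some q => if x.2 < q.2 then some x else some q) k
     (M.map (fun kv => kv.1), K.map (fun kv => kv.1),
      M.map (fun kv => kv.2), K.map (fun kv => kv.2))) := by
  induction xs generalizing m k with
  | nil => rfl
  | cons p t ih =>
    simp only [List.foldl_cons]
    cases m with
    | none =>
      cases k with
      | none => simpa [pvGtH, pvLtL] using ih (some p) (some p)
      | some q =>
        by_cases hk : p.2 < q.2
        · simpa [pvGtH, pvLtL, hk] using ih (some p) (some p)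
        · simpa [pvGtH, pvLtL, hk] using ih (some p) (some q)
    | some r =>
      cases k with
      | none =>
        by_cases hm : r.2 < p.2
        · simpa [pvGtH, pvLtL, hm] using ih (some p) (some p)
        · simpa [pvGtH, pvLtL, hm] using ih (some r) (some p)
      | some q =>
        by_cases hm : r.2 < p.2 <;> by_cases hk : p.2 < q.2
        · simpa [pvGtH, pvLtL, hm, hk] using ih (some p) (some p)
        · simpa [pvGtH, pvLtL, hm, hk] using ih (some p) (some q)
        · simpa [pvGtH, pvLtL, hm, hk] using ih (some r) (some p)
        · simpa [pvGtH, pvLtL, hm, hk] using ih (some r) (some q)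

-- ===== VERDICT (by name: the statement is the Claim_ definition above) =====
theorem find_extreme_expenses_spec : Claim_equal_find_extreme_expenses := by
  intro expenses _
  unfold Spec_find_extreme_expenses find_extreme_expenses find_extreme_expenses_alt
  cases expenses with
  | nil => rfl
  | cons p t =>
    have h := pv_fold_invariant (p :: t) none none
    simp only [Option.map_none] at h
    have hmax : PySem.List.max? (p :: t) (fun kv : String × Int => kv.2) =
        List.foldl
          (fun acc x => match acc with
            | none => some x
            | some q => if q.2 < x.2 then some x else some q) none (p :: t) := by
      unfold PySem.List.max?
      congr 1
      funext acc x
      cases acc <;> rfl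
    have hmin : PySem.List.min? (p :: t) (fun kv : String × Int => kv.2) =
        List.foldl
          (fun acc x => match acc with
            | none => some x
            | some q => if x.2 < q.2 then some x else some q) none (p :: t) := by
      unfold PySem.List.min?
      congr 1
      funext acc x
      cases acc <;> rfl
    simp only [h, hmax, hmin]
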